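-- pv_equiv track=rewrite | github.com/WaterBlade/learndata | chapter04/ex01.py | convert_stack02
-- ===== SOURCE A (Python) =====
-- def convert_stack02(stack):
--     s2 = list()
--     ith = 1
--     limit = len(stack)
--     while ith <= limit:
--         while len(stack) > 1:
--             s2.append(stack.pop())
--         top = stack.pop()
--         while len(s2) > ith - 1:
--             stack.append(s2.pop())
--         s2.append(top)
--         ith += 1
--     return s2
-- ===== SOURCE B (Python) =====
-- # Simpler: one linear drain via pop (leaves the input stack empty, like A) plus a reverse,
-- # instead of A's quadratic repeated-extraction. Return-value equivalence; both empty the input.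
-- def convert_stack02(stack):
--     s2 = []
--     while stack:
--         s2.append(stack.pop())
--     s2.reverse()
--     return s2
-- ===== Notes on version B (the rewrite author's own statement) =====
-- stated objective: faster
-- what changed: Replaces A's nested repeated-extraction (rebuilding the stack from s2 on every outer iteration) with a single pop-drain loop followed by one reverse.
import Mathlib
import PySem

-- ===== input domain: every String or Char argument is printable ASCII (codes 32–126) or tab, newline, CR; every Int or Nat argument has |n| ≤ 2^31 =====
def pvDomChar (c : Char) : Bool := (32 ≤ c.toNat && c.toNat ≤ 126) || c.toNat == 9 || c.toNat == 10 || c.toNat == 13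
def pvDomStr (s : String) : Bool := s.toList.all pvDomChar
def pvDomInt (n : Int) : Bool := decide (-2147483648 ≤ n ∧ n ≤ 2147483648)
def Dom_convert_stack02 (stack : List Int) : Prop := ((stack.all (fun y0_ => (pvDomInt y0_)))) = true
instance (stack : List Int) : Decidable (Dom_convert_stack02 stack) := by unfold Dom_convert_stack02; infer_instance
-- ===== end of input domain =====

-- B replaces A's nested O(n^2) repeated-extraction with one pop-drain pass plus a reverse
-- (simpler and asymptotically faster). Both Pythons empty the input stack in place; the
-- equivalence proved here is about the RETURN value.


-- ===== PORT A =====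
-- Python lists are kept in order; `.pop()` = take the last element (getLast?.getD 0 — the
-- `getD 0` default is never reached: every pop below is guarded by a length test or, for
-- `top`, by the loop invariant that the stack holds limit-ith+1 ≥ 1 elements) and drop it.

-- inner `while len(stack) > 1: s2.append(stack.pop())`
def pvDrain1 (stack s2 : List Int) : List Int × List Int :=
  if stack.length > 1 then pvDrain1 stack.dropLast (s2 ++ [stack.getLast?.getD 0])
  else (stack, s2)
termination_by stack.length
decreasing_by simp [List.length_dropLast]; omega

-- `while len(s2) > ith - 1: stack.append(s2.pop())`
def pvPushBack (stack s2 : List Int) (bound : Nat) : List Int × List Int :=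
  if s2.length > bound then pvPushBack (stack ++ [s2.getLast?.getD 0]) s2.dropLast bound
  else (stack, s2)
termination_by s2.length
decreasing_by simp [List.length_dropLast]; omega

-- outer `while ith <= limit` (ith, limit are the nonnegative Python counters, kept as Nat)
def pvOuter (stack s2 : List Int) (ith limit : Nat) : List Int :=
  if ith ≤ limit then
    let d := pvDrain1 stack s2
    let top := d.1.getLast?.getD 0          -- `top = stack.pop()`
    let p := pvPushBack d.1.dropLast d.2 (ith - 1)
    pvOuter p.1 (p.2 ++ [top]) (ith + 1) limit
  else s2
termination_by limit + 1 - ith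
decreasing_by omega

def convert_stack02 (stack : List Int) : List Int :=
  pvOuter stack [] 1 stack.length

-- ===== PORT B =====
-- `while stack: s2.append(stack.pop())`
def pvDrainAll (stack s2 : List Int) : List Int :=
  if stack.length > 0 then pvDrainAll stack.dropLast (s2 ++ [stack.getLast?.getD 0])
  else s2
termination_by stack.length
decreasing_by simp [List.length_dropLast]; omega

def convert_stack02_alt (stack : List Int) : List Int :=
  (pvDrainAll stack []).reverse

-- ===== PRECONDITION & SPEC =====
def Spec_convert_stack02 (stack : List Int) (out : List Int) : Prop := out = convert_stack02_alt stack
instance (stack : List Int) (out : List Int) : Decidable (Spec_convert_stack02 stack out) := by unfold Spec_convert_stack02; infer_instance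

-- ===== CLAIM (what is proved, stated in full; the proofs are below) =====
def Claim_equal_convert_stack02 : Prop := ∀ (stack : List Int), Dom_convert_stack02 stack → Spec_convert_stack02 stack (convert_stack02 stack)

-- ===== LEMMAS AND PROOFS =====

theorem pvDrainAll_eq (stack : List Int) : ∀ s2, pvDrainAll stack s2 = s2 ++ stack.reverse := by
  induction stack using List.reverseRecOn with
  | nil => intro s2; simp [pvDrainAll]
  | append_singleton xs x ih =>
      intro s2
      rw [pvDrainAll]
      simp [ih]

theorem pvDrain1_eq (stack : List Int) :
    ∀ s2, pvDrain1 stack s2 = (stack.take 1, s2 ++ (stack.drop 1).reverse) := by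
  induction stack using List.reverseRecOn with
  | nil => intro s2; simp [pvDrain1]
  | append_singleton xs x ih =>
      intro s2
      cases xs with
      | nil => rw [pvDrain1]; simp
      | cons a as =>
          rw [pvDrain1]
          simp only [List.length_append, List.length_cons]
          rw [if_pos (by omega)]
          have h1 : ((a :: as) ++ [x]).getLast?.getD 0 = x := by
            rw [List.getLast?_concat]; rfl
          have h2 : ((a :: as) ++ [x]).dropLast = a :: as := List.dropLast_concat
          rw [h1, h2, ih]
          simp

theorem pvPushBack_eq (r : List Int) :
    ∀ (st p : List Int) (b : Nat), p.length = b →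
      pvPushBack st (p ++ r) b = (st ++ r.reverse, p) := by
  induction r using List.reverseRecOn with
  | nil => intro st p b hb; rw [pvPushBack]; simp [hb]
  | append_singleton ys y ih =>
      intro st p b hb
      rw [pvPushBack]
      simp only [List.length_append, List.length_singleton]
      rw [if_pos (by omega)]
      have h1 : (p ++ (ys ++ [y])).getLast?.getD 0 = y := by simp
      have h2 : (p ++ (ys ++ [y])).dropLast = p ++ ys := by
        rw [← List.append_assoc, List.dropLast_concat]
      rw [h1, h2, ih (st ++ [y]) p b hb]
      simp

theorem pvOuter_inv (orig : List Int) :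
    ∀ (m k : Nat), k + m = orig.length →
      pvOuter (orig.drop k) (orig.take k) (k + 1) orig.length = orig := by
  intro m
  induction m with
  | zero =>
      intro k hk
      rw [pvOuter, if_neg (by omega)]
      simp [show k = orig.length by omega]
  | succ m ih =>
      intro k hk
      have hk' : k < orig.length := by omega
      rw [pvOuter, if_pos (by omega)]
      simp only [pvDrain1_eq]
      have htop : ((orig.drop k).take 1).getLast?.getD 0 = orig[k] := by
        rw [List.drop_eq_getElem_cons hk']
        simp only [List.take_succ_cons, List.take_zero, List.getLast?_singleton,
          Option.getD_some]
      have hdl : ((orig.drop k).take 1).dropLast = ([] : List Int) := by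
        rw [List.drop_eq_getElem_cons hk']
        simp only [List.take_succ_cons, List.take_zero, List.dropLast_singleton]
      have hpb := pvPushBack_eq ((orig.drop k).drop 1).reverse []
        (orig.take k) (k + 1 - 1) (by simp; omega)
      simp only [htop, hdl, hpb]
      simp only [List.reverse_reverse, List.drop_drop, List.nil_append]
      have hs2 : orig.take k ++ [orig[k]] = orig.take (k + 1) := by
        rw [List.take_add_one]
        simp [List.getElem?_eq_getElem hk']
      rw [hs2]
      exact ih (k + 1) (by omega)

theorem convert_stack02_id (stack : List Int) : convert_stack02 stack = stack := by
  have := pvOuter_inv stack stack.length 0 (by omega)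
  simpa [convert_stack02] using this

-- ===== VERDICT (by name: the statement is the Claim_ definition above) =====
theorem convert_stack02_spec : Claim_equal_convert_stack02 := by
  intro stack _
  unfold Spec_convert_stack02
  rw [convert_stack02_id, convert_stack02_alt, pvDrainAll_eq]
  simp
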